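-- pv_equiv track=rewrite | github.com/gavinlive/aihack2018 | data_manager_old.py | find_missing_data
-- ===== SOURCE A (Python) =====
-- def find_missing_data(lol):
--     missing = []
--     main_list = lol[0]
--     del(lol[0])
--     for i in main_list:
--         for other_list in lol:
--             present = (i in other_list)
--             if(present==False):
--                 missing.append(i)
--                 break
--     return missing
-- ===== SOURCE B (Python) =====
-- def find_missing_data(lol):
--     main_list = lol[0]
--     del lol[0]
--     if not lol:
--         return []
--     common = set(lol[0])
--     for other in lol[1:]:
--         common &= set(other)
--     return [i for i in main_list if i not in common]
-- ===== Notes on version B (the rewrite author's own statement) =====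
-- stated objective: alternative
-- what changed: B replaces A's per-element nested scan over the other lists with one precomputed intersection set of all other lists followed by a single membership-filter pass over the first list.
-- outside the precondition, e.g. on find_missing_data([]): A raises IndexError, B raises IndexError
import Mathlib
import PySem

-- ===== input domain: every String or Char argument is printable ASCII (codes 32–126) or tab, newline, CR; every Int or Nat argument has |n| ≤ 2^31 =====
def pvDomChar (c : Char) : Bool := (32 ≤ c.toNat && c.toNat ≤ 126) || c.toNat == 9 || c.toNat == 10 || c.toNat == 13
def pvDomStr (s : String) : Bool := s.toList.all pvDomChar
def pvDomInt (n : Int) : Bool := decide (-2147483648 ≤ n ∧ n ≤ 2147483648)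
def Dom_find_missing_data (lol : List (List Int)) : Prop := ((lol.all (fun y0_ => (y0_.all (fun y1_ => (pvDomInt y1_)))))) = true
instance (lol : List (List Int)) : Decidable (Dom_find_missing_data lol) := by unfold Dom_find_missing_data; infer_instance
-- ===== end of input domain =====

-- B replaces A's per-element nested scan with one precomputed intersection set of the
-- other lists plus a single filtering pass over the first list (objective: alternative).
-- A mutates its argument (del lol[0]); B performs the same mutation; the theorems below
-- are about the RETURN value only.

-- ===== PORT A =====
-- inner 'for other_list in lol: … break' — true iff some other list lacks i
def aLacksSome (i : Int) : List (List Int) → Bool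
  | [] => false
  | ol :: rest => if (ol.contains i) == false then true else aLacksSome i rest

def find_missing_data (lol : List (List Int)) : List Int :=
  match lol with
  | [] => []  -- lol[0] raises IndexError; excluded by Pre_
  | main :: rest =>
    main.foldl (fun missing i => if aLacksSome i rest then missing ++ [i] else missing) []

-- ===== PORT B =====
def find_missing_data_alt (lol : List (List Int)) : List Int :=
  match lol with
  | [] => []  -- lol[0] raises IndexError; excluded by Pre_
  | main :: rest =>
    match rest with
    | [] => []
    | first :: others =>
      let common := others.foldl (fun c other => PySem.Set.inter c other) (PySem.Set.ofList first)
      main.filter (fun i => !(common.contains i))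

-- ===== PRECONDITION & SPEC =====
-- Pre_ excludes the empty outer list, on which both A and B raise IndexError at lol[0].
def Pre_find_missing_data (lol : List (List Int)) : Prop := lol ≠ []
instance (lol : List (List Int)) : Decidable (Pre_find_missing_data lol) := by unfold Pre_find_missing_data; infer_instance
def pvWitness_find_missing_data : List (List Int) := [[1, 2, 3], [2, 3], [3]]

def Spec_find_missing_data (lol : List (List Int)) (out : List Int) : Prop := out = find_missing_data_alt lol
instance (lol : List (List Int)) (out : List Int) : Decidable (Spec_find_missing_data lol out) := by unfold Spec_find_missing_data; infer_instance

-- ===== CLAIM (what is proved, stated in full; the proofs are below) =====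
def Claim_equal_find_missing_data : Prop := ∀ (lol : List (List Int)), Dom_find_missing_data lol → Pre_find_missing_data lol → Spec_find_missing_data lol (find_missing_data lol)

-- ===== LEMMAS AND PROOFS =====

-- A's inner loop is an 'any'
theorem aLacksSome_eq_any (i : Int) (rest : List (List Int)) :
    aLacksSome i rest = rest.any (fun ol => !(ol.contains i)) := by
  induction rest with
  | nil => rfl
  | cons ol rest ih =>
    simp only [aLacksSome, List.any_cons, ih]
    cases h : ol.contains i <;> simp

-- membership in B's intersection fold
theorem mem_inter_foldl (i : Int) (others : List (List Int)) (s : PySem.Set Int) :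
    i ∈ others.foldl (fun c other => PySem.Set.inter c other) s ↔
      i ∈ s ∧ ∀ ol ∈ others, i ∈ ol := by
  induction others generalizing s with
  | nil => simp
  | cons ol others ih =>
    simp only [List.foldl_cons, ih, PySem.Set.mem_inter, List.mem_cons]
    constructor
    · rintro ⟨⟨hs, ho⟩, h⟩
      refine ⟨hs, fun l hl => ?_⟩
      rcases hl with rfl | hl
      · exact ho
      · exact h l hl
    · rintro ⟨hs, h⟩
      exact ⟨⟨hs, h ol (Or.inl rfl)⟩, fun l hl => h l (Or.inr hl)⟩

-- ===== VERDICT (by name: the statement is the Claim_ definition above) =====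
theorem find_missing_data_spec : Claim_equal_find_missing_data := by
  intro lol _ hpre
  unfold Spec_find_missing_data find_missing_data find_missing_data_alt
  match lol with
  | [] => exact absurd rfl hpre
  | main :: rest =>
    simp only
    rw [PySem.List.foldl_append_if_eq_filter, List.nil_append]
    match rest with
    | [] =>
      simp [show ∀ i : Int, aLacksSome i [] = false from fun _ => rfl]
    | first :: others =>
      apply List.filter_congr
      intro i _
      have hmem : (others.foldl (fun c other => PySem.Set.inter c other)
          (PySem.Set.ofList first)).contains i
          = ((first :: others).all (fun ol => ol.contains i)) := by
        rw [Bool.eq_iff_iff]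
        simp only [List.contains_iff_mem, List.all_eq_true]
        simp only [PySem.Set.contains, List.contains_iff_mem]
        rw [mem_inter_foldl, PySem.Set.mem_ofList]
        constructor
        · rintro ⟨hf, ho⟩ l hl
          rcases List.mem_cons.mp hl with rfl | hl
          · exact hf
          · exact ho l hl
        · intro h
          exact ⟨h first (List.mem_cons_self ..), fun l hl => h l (List.mem_cons_of_mem _ hl)⟩
      rw [aLacksSome_eq_any, List.any_eq_not_all_not]
      simp only [Bool.not_not]
      rw [hmem]
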